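-- pv_equiv track=rewrite | github.com/rohitsureshsutar2000/BizzAppDevChallenge | 3rdChallenge.py | Calculate_meet_Time
-- ===== SOURCE A (Python) =====
-- def Calculate_meet_Time(z):
--     cockroach1=1                                #start form 1
--     cockroach2=z+1                              #start form 100
--     count=0                                     # Answer 38
--
--
--     while cockroach1<cockroach2:
--         if cockroach1 < cockroach2:
--             if count % 5 ==0:                   # one step back
--                 cockroach2 = cockroach2 + 1
--             if count % 10 == 0:                 # two step back
--                 cockroach1 = cockroach1 - 2
--             cockroach1=cockroach1+1
--             cockroach2=cockroach2-2
--
--         else: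
--             cockroach1 = cockroach1 + 1
--         if cockroach1<=cockroach2:
--             count = count + 1
--
--     return count
-- ===== SOURCE B (Python) =====
-- # O(1) closed form: the gap shrinks by exactly 26 every 10 counted steps,
-- # so jump whole periods arithmetically and look up the remainder in a table.
-- _T = [1, 1, 2, 2, 2, 3, 3, 3, 4, 4, 4, 5, 5,
--       6, 6, 6, 7, 7, 7, 8, 8, 8, 9, 9, 9, 10]
--
-- def Calculate_meet_Time(z):
--     if z <= 0:
--         return 0
--     q, r = divmod(z - 1, 26)
--     return 10 * q + _T[r]
-- ===== Notes on version B (the rewrite author's own statement) =====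
-- stated objective: faster
-- what changed: Replaces the step-by-step two-bug simulation loop with an O(1) closed form: the gap shrinks by exactly 26 every 10 counted steps, so B jumps whole periods with divmod(z-1,26) and reads the remainder's answer from a 26-entry table.
import Mathlib
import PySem

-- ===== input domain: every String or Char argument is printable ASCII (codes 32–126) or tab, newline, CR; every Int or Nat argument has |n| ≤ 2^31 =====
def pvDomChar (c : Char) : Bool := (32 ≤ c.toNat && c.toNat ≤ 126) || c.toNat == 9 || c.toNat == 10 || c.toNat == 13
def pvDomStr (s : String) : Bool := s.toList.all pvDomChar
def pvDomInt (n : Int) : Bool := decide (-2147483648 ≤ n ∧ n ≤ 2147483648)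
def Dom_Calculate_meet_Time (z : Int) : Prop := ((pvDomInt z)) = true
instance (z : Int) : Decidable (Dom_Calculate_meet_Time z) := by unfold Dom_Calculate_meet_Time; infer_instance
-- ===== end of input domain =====

-- B replaces A's O(z) step-by-step simulation by an O(1) period-26 closed form with a 26-entry table.

-- ===== PORT A =====
-- The while loop of A as structural recursion on an explicit fuel that is a totality
-- guard only: loopA_fuel_mono below proves the fuel Calculate_meet_Time supplies is never
-- exhausted, so the fuel never changes the computed value.
-- The Python body's inner `if cockroach1 < cockroach2` repeats the loop guard
-- (its else-branch is unreachable), so the guard condition plays both roles.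
def loopA (fuel : Nat) (c1 c2 count : Int) : Int :=
  match fuel with
  | 0 => count
  | fuel + 1 =>
    if c1 < c2 then
      let c2a := if PySem.Int.mod count 5 = 0 then c2 + 1 else c2     -- one step back for cockroach2
      let c1a := if PySem.Int.mod count 10 = 0 then c1 - 2 else c1    -- two steps back for cockroach1
      let c1b := c1a + 1
      let c2b := c2a - 2
      let count' := if c1b ≤ c2b then count + 1 else count
      loopA fuel c1b c2b count'
    else count

def Calculate_meet_Time (z : Int) : Int := loopA (13 * z + 10).toNat 1 (z + 1) 0

-- ===== PORT B =====
def pvTbl : List Int := [1, 1, 2, 2, 2, 3, 3, 3, 4, 4, 4, 5, 5,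
                         6, 6, 6, 7, 7, 7, 8, 8, 8, 9, 9, 9, 10]

def Calculate_meet_Time_alt (z : Int) : Int :=
  if z ≤ 0 then 0
  else
    let q := PySem.Int.floordiv (z - 1) 26
    let r := PySem.Int.mod (z - 1) 26
    -- _T[r]: r is always in [0, 26), so the index never raises; getD 0 is never used
    10 * q + (PySem.List.pyGet? pvTbl r).getD 0

-- ===== PRECONDITION & SPEC =====
def Spec_Calculate_meet_Time (z : Int) (out : Int) : Prop := out = Calculate_meet_Time_alt z
instance (z : Int) (out : Int) : Decidable (Spec_Calculate_meet_Time z out) := by unfold Spec_Calculate_meet_Time; infer_instance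

-- ===== CLAIM (what is proved, stated in full; the proofs are below) =====
def Claim_equal_Calculate_meet_Time : Prop := ∀ (z : Int), Dom_Calculate_meet_Time z → Spec_Calculate_meet_Time z (Calculate_meet_Time z)

-- ===== LEMMAS AND PROOFS =====

theorem pymod5 (a : Int) : PySem.Int.mod a 5 = a % 5 :=
  PySem.Int.mod_eq_emod_of_pos (by norm_num)
theorem pymod10 (a : Int) : PySem.Int.mod a 10 = a % 10 :=
  PySem.Int.mod_eq_emod_of_pos (by norm_num)
theorem pymod26 (a : Int) : PySem.Int.mod a 26 = a % 26 :=
  PySem.Int.mod_eq_emod_of_pos (by norm_num)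
theorem pydiv26 (a : Int) : PySem.Int.floordiv a 26 = a / 26 :=
  PySem.Int.floordiv_eq_ediv_of_pos (by norm_num)

-- the loop's value does not depend on the fuel, as long as the fuel exceeds the
-- measure 13*(c2-c1) + 9 - count % 10, which strictly decreases at every iteration
theorem loopA_fuel_mono :
    ∀ (f g : Nat) (c1 c2 count : Int),
      (13 * (c2 - c1) + 9 - count % 10).toNat < f → f ≤ g →
      loopA f c1 c2 count = loopA g c1 c2 count := by
  intro f
  induction f with
  | zero => intro g c1 c2 count hb _; omega
  | succ f ih =>
    intro g c1 c2 count hb hfg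
    match g, hfg with
    | g + 1, hfg =>
      rw [loopA, loopA]
      by_cases h : c1 < c2
      · rw [if_pos h, if_pos h]
        simp only [pymod5, pymod10]
        apply ih
        · have h5 := Int.emod_nonneg count (by norm_num : (5:Int) ≠ 0)
          split_ifs at hb ⊢ <;> omega
        · omega
      · rw [if_neg h, if_neg h]

-- loopA is invariant under shifting both positions by the same amount
theorem loopA_shift :
    ∀ (f : Nat) (c1 c2 count d : Int),
      loopA f (c1 + d) (c2 + d) count = loopA f c1 c2 count := by
  intro f
  induction f with
  | zero => intro c1 c2 count d; rfl
  | succ f ih =>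
    intro c1 c2 count d
    rw [loopA, loopA]
    by_cases h : c1 < c2
    · rw [if_pos (by omega : c1 + d < c2 + d), if_pos h]
      have e2 : ∀ x : Int, (if PySem.Int.mod count 5 = 0 then x + d + 1 else x + d)
          = (if PySem.Int.mod count 5 = 0 then x + 1 else x) + d := by
        intro x; split_ifs <;> ring
      have e1 : ∀ x : Int, (if PySem.Int.mod count 10 = 0 then x + d - 2 else x + d)
          = (if PySem.Int.mod count 10 = 0 then x - 2 else x) + d := by
        intro x; split_ifs <;> ring
      simp only [e2, e1]
      have e5 : ∀ a b : Int, (if a + d + 1 ≤ b + d - 2 then count + 1 else count)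
          = (if a + 1 ≤ b - 2 then count + 1 else count) := by
        intro a b; split_ifs <;> omega
      rw [e5]
      have e3 : ∀ a b : Int,
          loopA f ((a + d) + 1) ((b + d) - 2) (if a + 1 ≤ b - 2 then count + 1 else count)
          = loopA f (a + 1) (b - 2) (if a + 1 ≤ b - 2 then count + 1 else count) := by
        intro a b
        rw [show (a + d) + 1 = (a + 1) + d from by ring,
            show (b + d) - 2 = (b - 2) + d from by ring, ih]
      exact e3 _ _
    · rw [if_neg (by omega : ¬ (c1 + d < c2 + d)), if_neg h]
  
-- adding 10 to count adds 10 to the result (count only enters through % 5, % 10 and +1)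
theorem loopA_count10 :
    ∀ (f : Nat) (c1 c2 count : Int),
      loopA f c1 c2 (count + 10) = loopA f c1 c2 count + 10 := by
  intro f
  induction f with
  | zero => intro c1 c2 count; rfl
  | succ f ih =>
    intro c1 c2 count
    rw [loopA, loopA]
    by_cases h : c1 < c2
    · rw [if_pos h, if_pos h]
      simp only [pymod5, pymod10]
      have e5 : (if (count + 10) % 5 = 0 then c2 + 1 else c2)
          = (if count % 5 = 0 then c2 + 1 else c2) := by
        split_ifs <;> omega
      have e10 : (if (count + 10) % 10 = 0 then c1 - 2 else c1)
          = (if count % 10 = 0 then c1 - 2 else c1) := by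
        split_ifs <;> omega
      rw [e5, e10]
      have ec : ∀ a b : Int, (if a ≤ b then count + 10 + 1 else count + 10)
          = (if a ≤ b then count + 1 else count) + 10 := by
        intro a b; split_ifs <;> ring
      rw [ec, ih]
    · rw [if_neg h, if_neg h]

-- one unfolding of the loop with explicitly supplied next state
theorem loopA_step (f : Nat) (c1 c2 count c1' c2' cnt' : Int) (h : c1 < c2)
    (h1 : c1' = (if count % 10 = 0 then c1 - 2 else c1) + 1)
    (h2 : c2' = (if count % 5 = 0 then c2 + 1 else c2) - 2)
    (hc : cnt' = if c1' ≤ c2' then count + 1 else count) :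
    loopA (f + 1) c1 c2 count = loopA f c1' c2' cnt' := by
  rw [loopA, if_pos h]
  simp only [pymod5, pymod10]
  rw [← h2, ← h1, ← hc]

-- one full period of ten counted steps: the gap shrinks by exactly 26
theorem loopA_period (z : Int) (hz : 27 ≤ z) :
    loopA (13 * z + 10).toNat 1 (z + 1) 0 =
      10 + loopA (13 * (z - 26) + 10).toNat 1 (z - 26 + 1) 0 := by
  obtain ⟨f, hf⟩ : ∃ f, (13 * z + 10).toNat = f + 10 := ⟨(13 * z).toNat, by omega⟩
  rw [hf]
  rw [show f + 10 = (f + 9) + 1 from rfl,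
      loopA_step (f+9) 1 (z+1) 0 0 z 1 (by omega) (by norm_num) (by norm_num; ring)
        (by rw [if_pos (by omega : (0:Int) ≤ z)]; norm_num)]
  rw [show f + 9 = (f + 8) + 1 from rfl,
      loopA_step (f+8) 0 z 1 1 (z-2) 2 (by omega) (by norm_num) (by norm_num)
        (by rw [if_pos (by omega : (1:Int) ≤ z-2)]; norm_num)]
  rw [show f + 8 = (f + 7) + 1 from rfl,
      loopA_step (f+7) 1 (z-2) 2 2 (z-4) 3 (by omega) (by norm_num) (by norm_num; ring)
        (by rw [if_pos (by omega : (2:Int) ≤ z-4)]; norm_num)]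
  rw [show f + 7 = (f + 6) + 1 from rfl,
      loopA_step (f+6) 2 (z-4) 3 3 (z-6) 4 (by omega) (by norm_num) (by norm_num; ring)
        (by rw [if_pos (by omega : (3:Int) ≤ z-6)]; norm_num)]
  rw [show f + 6 = (f + 5) + 1 from rfl,
      loopA_step (f+5) 3 (z-6) 4 4 (z-8) 5 (by omega) (by norm_num) (by norm_num; ring)
        (by rw [if_pos (by omega : (4:Int) ≤ z-8)]; norm_num)]
  rw [show f + 5 = (f + 4) + 1 from rfl,
      loopA_step (f+4) 4 (z-8) 5 5 (z-9) 6 (by omega) (by norm_num) (by norm_num; ring)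
        (by rw [if_pos (by omega : (5:Int) ≤ z-9)]; norm_num)]
  rw [show f + 4 = (f + 3) + 1 from rfl,
      loopA_step (f+3) 5 (z-9) 6 6 (z-11) 7 (by omega) (by norm_num) (by norm_num; ring)
        (by rw [if_pos (by omega : (6:Int) ≤ z-11)]; norm_num)]
  rw [show f + 3 = (f + 2) + 1 from rfl,
      loopA_step (f+2) 6 (z-11) 7 7 (z-13) 8 (by omega) (by norm_num) (by norm_num; ring)
        (by rw [if_pos (by omega : (7:Int) ≤ z-13)]; norm_num)]
  rw [show f + 2 = (f + 1) + 1 from rfl,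
      loopA_step (f+1) 7 (z-13) 8 8 (z-15) 9 (by omega) (by norm_num) (by norm_num; ring)
        (by rw [if_pos (by omega : (8:Int) ≤ z-15)]; norm_num)]
  rw [loopA_step f 8 (z-15) 9 9 (z-17) 10 (by omega) (by norm_num) (by norm_num; ring)
        (by rw [if_pos (by omega : (9:Int) ≤ z-17)]; norm_num)]
  rw [show (9:Int) = 1 + 8 from by norm_num,
      show z - 17 = (z - 26 + 1) + 8 from by ring,
      loopA_shift f 1 (z - 26 + 1) 10 8]
  have h10 := loopA_count10 f 1 (z - 26 + 1) 0
  norm_num at h10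
  rw [h10]
  have hm := loopA_fuel_mono ((13 * (z - 26) + 10).toNat) f 1 (z - 26 + 1) 0
    (by omega) (by omega)
  omega

-- base case: for z ≤ 26 both sides are computed directly
theorem base_case (z : Int) (hle : z ≤ 26) :
    Calculate_meet_Time z = Calculate_meet_Time_alt z := by
  rcases le_or_gt z 0 with h0 | h0
  · rw [Calculate_meet_Time]
    have hf : (13 * z + 10).toNat ≤ 10 := by omega
    interval_cases hfv : (13 * z + 10).toNat <;>
      · rw [Calculate_meet_Time_alt, if_pos h0]
        first
        | rfl
        | (rw [loopA, if_neg (by omega : ¬ ((1:Int) < z + 1))])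
  · rw [Calculate_meet_Time]
    interval_cases z <;> decide

-- periodicity of the closed form
theorem alt_period (z : Int) (hz : 27 ≤ z) :
    Calculate_meet_Time_alt z = 10 + Calculate_meet_Time_alt (z - 26) := by
  rw [Calculate_meet_Time_alt, Calculate_meet_Time_alt,
      if_neg (by omega), if_neg (by omega)]
  simp only [pymod26, pydiv26]
  have hm : (z - 1) % 26 = (z - 26 - 1) % 26 := by omega
  have hd : (z - 1) / 26 = (z - 26 - 1) / 26 + 1 := by omega
  rw [hm, hd]; ring

theorem main_eq : ∀ (z : Int), Calculate_meet_Time z = Calculate_meet_Time_alt z := by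
  have key : ∀ (n : Nat) (z : Int), z.toNat = n →
      Calculate_meet_Time z = Calculate_meet_Time_alt z := by
    intro n
    induction n using Nat.strong_induction_on with
    | _ n ih =>
      intro z hzn
      rcases le_or_gt z 26 with hle | hgt
      · exact base_case z hle
      · have hz : 27 ≤ z := by omega
        rw [Calculate_meet_Time, loopA_period z hz, alt_period z hz,
            ← Calculate_meet_Time, ih (z - 26).toNat (by omega) (z - 26) rfl]
  intro z; exact key z.toNat z rfl

-- ===== VERDICT (by name: the statement is the Claim_ definition above) =====
theorem Calculate_meet_Time_spec : Claim_equal_Calculate_meet_Time := by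
  intro z _
  unfold Spec_Calculate_meet_Time
  exact main_eq z
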